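-- pv_equiv track=rewrite | github.com/opencitations/cec | extractor/cex/combined.py | validate_file_list
-- ===== SOURCE A (Python) =====
-- def validate_file_list(file_list, create_rdf):
--     # Required file types and their initial counts
--     if create_rdf:
--         required_counts = {'.xml': 1, '.json': 2, '.jsonld': 1}
--     else:
--         required_counts = {'.xml': 1, '.json': 1}
--
--     # Initialize counters
--     actual_counts = {ext: 0 for ext in required_counts}
--
--     # Check each file in the list
--     for file in file_list:
--         ext = '.' + file.lower().rsplit('.', 1)[-1]  # Extract file extension
--         if ext in actual_counts:
--             actual_counts[ext] += 1
--         else: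
--             return False  # Unexpected file extension
--
--     # Check if actual file counts match expected counts
--     return actual_counts == required_counts
-- ===== SOURCE B (Python) =====
-- def validate_file_list(file_list, create_rdf):
--     # Multiset equality via sorting: the file list is valid exactly when the
--     # sorted list of its extensions equals the sorted required multiset.
--     expected = ['.json', '.json', '.jsonld', '.xml'] if create_rdf else ['.json', '.xml']
--     exts = sorted('.' + f.lower().rsplit('.', 1)[-1] for f in file_list)
--     return exts == expected
-- ===== Notes on version B (the rewrite author's own statement) =====
-- stated objective: alternative
-- what changed: Replaces A's dict-based counting with a per-element membership branch and early return by multiset equality via sorting: collect all extensions, sort them, and compare once against the sorted required multiset literal; no dict, no counters, no branch inside the loop.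
import Mathlib
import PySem

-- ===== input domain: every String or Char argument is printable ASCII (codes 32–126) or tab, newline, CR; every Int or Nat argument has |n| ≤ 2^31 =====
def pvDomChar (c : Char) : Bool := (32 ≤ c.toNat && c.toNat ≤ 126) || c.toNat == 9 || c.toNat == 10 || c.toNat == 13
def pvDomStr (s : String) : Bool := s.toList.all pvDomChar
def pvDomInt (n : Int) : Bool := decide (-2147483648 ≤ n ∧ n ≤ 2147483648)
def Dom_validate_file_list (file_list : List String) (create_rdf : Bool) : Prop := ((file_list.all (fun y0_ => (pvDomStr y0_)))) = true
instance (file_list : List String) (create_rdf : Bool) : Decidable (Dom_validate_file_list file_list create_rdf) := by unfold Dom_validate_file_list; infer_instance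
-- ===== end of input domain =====

-- B replaces A's dict counting with membership branch and early return by multiset
-- equality via sorting: sort the extension list and compare it once with the sorted
-- required multiset (objective: alternative algorithm).

-- shared helper: exact hand port of the subexpression '.' + file.lower().rsplit('.', 1)[-1]
-- (rsplit('.', 1)[-1] is the part after the LAST '.', or the whole string if there is no '.')
def extOf (file : String) : String :=
  let cs := PySem.Chars.lower file.toList
  String.ofList ('.' :: ((cs.reverse.takeWhile (fun c => c != '.')).reverse))

-- A-side helper: Python's '==' on dicts (mapping equality, insertion order ignored)
def pyDictEq (d e : PySem.Dict String Int) : Bool :=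
  d.keys.all (fun k => e.get? k == d.get? k) && e.keys.all (fun k => e.get? k == d.get? k)

-- ===== PORT A =====
-- 'for file in file_list: …' with the early 'return False'; the base case is the final comparison
def validateLoop (required : PySem.Dict String Int) :
    List String → PySem.Dict String Int → Bool
  | [], actual => pyDictEq actual required
  | file :: rest, actual =>
    let ext := extOf file
    if actual.contains ext then
      validateLoop required rest (actual.modify ext 0 (· + 1))
    else
      false

def validate_file_list (file_list : List String) (create_rdf : Bool) : Bool :=
  let required : PySem.Dict String Int :=
    if create_rdf then PySem.Dict.ofList [(".xml", 1), (".json", 2), (".jsonld", 1)]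
    else PySem.Dict.ofList [(".xml", 1), (".json", 1)]
  -- {ext: 0 for ext in required_counts}
  let actual := required.keys.foldl (fun d k => d.insert k 0) PySem.Dict.empty
  validateLoop required file_list actual

-- ===== PORT B =====
def validate_file_list_alt (file_list : List String) (create_rdf : Bool) : Bool :=
  let expected : List String :=
    if create_rdf then [".json", ".json", ".jsonld", ".xml"] else [".json", ".xml"]
  let exts := PySem.List.sorted (file_list.map extOf) (fun x => x) false
  exts == expected

-- ===== PRECONDITION & SPEC =====
def Spec_validate_file_list (file_list : List String) (create_rdf : Bool) (out : Bool) : Prop := out = validate_file_list_alt file_list create_rdf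
instance (file_list : List String) (create_rdf : Bool) (out : Bool) : Decidable (Spec_validate_file_list file_list create_rdf out) := by unfold Spec_validate_file_list; infer_instance

-- ===== CLAIM (what is proved, stated in full; the proofs are below) =====
def Claim_equal_validate_file_list : Prop := ∀ (file_list : List String) (create_rdf : Bool), Dom_validate_file_list file_list create_rdf → Spec_validate_file_list file_list create_rdf (validate_file_list file_list create_rdf)

-- ===== LEMMAS AND PROOFS =====

-- the zero-initialised dict: lookups give 0
lemma zero_getD (l : List String) (d : PySem.Dict String Int)
    (h : ∀ k, d.getD k 0 = 0) (k : String) :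
    (l.foldl (fun d k => d.insert k 0) d).getD k 0 = 0 := by
  induction l generalizing d with
  | nil => exact h k
  | cons x xs ih =>
    refine ih _ (fun k' => ?_)
    rw [PySem.Dict.getD_insert]
    split <;> simp [h]

-- the zero-initialised dict over Nodup keys has exactly those keys
lemma zero_keys (ks : List String) (hnd : ks.Nodup) :
    (ks.foldl (fun d k => d.insert k 0) (PySem.Dict.empty : PySem.Dict String Int)).keys = ks := by
  rw [PySem.Dict.keys_foldl_insert]
  simp [PySem.Set.update_nil_left, PySem.Set.ofList_eq_self_of_nodup _ hnd]

-- get? expressed through contains and getD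
lemma get?_eq_ite (d : PySem.Dict String Int) (k : String) :
    d.get? k = if d.contains k = true then some (d.getD k 0) else none := by
  cases h : d.get? k with
  | none =>
    have hc : d.contains k = false := by rw [PySem.Dict.contains_eq_isSome_get?, h]; rfl
    simp [hc]
  | some v =>
    have hc : d.contains k = true := by rw [PySem.Dict.contains_eq_isSome_get?, h]; rfl
    rw [if_pos hc]
    simp [PySem.Dict.getD_eq_get?_getD, h]

-- characterisation of A's loop: early return ⇔ some extension not a required key
lemma loopA_char (r : PySem.Dict String Int) (files : List String)
    (actual : PySem.Dict String Int)
    (h : ∀ k, actual.contains k = r.contains k) :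
    validateLoop r files actual =
      if files.all (fun f => r.contains (extOf f)) then
        pyDictEq (files.foldl (fun d f => d.modify (extOf f) 0 (· + 1)) actual) r
      else false := by
  induction files generalizing actual with
  | nil => simp [validateLoop]
  | cons f rest ih =>
    by_cases hc : r.contains (extOf f) = true
    · have h' : ∀ k, (actual.modify (extOf f) 0 (· + 1)).contains k = r.contains k := by
        intro k
        rw [PySem.Dict.contains_modify]
        by_cases hk : k == extOf f
        · have : k = extOf f := by simpa using hk
          simp [this, hc, h]
        · simp at hk
          simp [hk, h]
      simp [validateLoop, h, hc, ih _ h']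
    · simp at hc
      simp [validateLoop, h, hc]

lemma bool_eq_of_iff {a b : Bool} (h : a = true ↔ b = true) : a = b := by
  cases a <;> cases b <;> simp_all

-- the core fact about A: it decides whether the extension list is a permutation of L,
-- for any required dict r with Nodup keys that describes the multiset L
lemma core (r : PySem.Dict String Int) (L : List String) (hr : r.keys.Nodup)
    (hcount : ∀ k ∈ r.keys, r.get? k = some ((L.count k : Int)))
    (hLmem : ∀ x ∈ L, x ∈ r.keys) (files : List String) :
    validateLoop r files (r.keys.foldl (fun d k => d.insert k 0) PySem.Dict.empty) =
      decide ((files.map extOf).Perm L) := by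
  set z := r.keys.foldl (fun d k => d.insert k 0) (PySem.Dict.empty : PySem.Dict String Int) with hzdef
  have hzk : z.keys = r.keys := zero_keys r.keys hr
  have hz0 : ∀ k, z.getD k 0 = 0 := fun k => zero_getD _ _ (fun k' => by simp [PySem.Dict.getD_empty]) k
  have hzc : ∀ k, z.contains k = r.contains k := by
    intro k
    rw [PySem.Dict.contains_eq_decide_mem_keys, PySem.Dict.contains_eq_decide_mem_keys, hzk]
  rw [loopA_char r files z hzc]
  set xs := files.map extOf with hxs
  by_cases hgood : files.all (fun f => r.contains (extOf f)) = true
  · rw [if_pos hgood]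
    have hgood' : ∀ x ∈ xs, x ∈ r.keys := by
      intro x hx
      rw [hxs] at hx
      obtain ⟨f, hf, rfl⟩ := List.mem_map.mp hx
      have := (List.all_eq_true.mp hgood) f hf
      rw [PySem.Dict.contains_eq_decide_mem_keys] at this
      simpa using this
    have hfold : files.foldl (fun d f => d.modify (extOf f) 0 (· + 1)) z =
        xs.foldl (fun d x => d.modify x 0 (· + 1)) z := by
      rw [hxs, List.foldl_map]
    rw [hfold]
    set final := xs.foldl (fun d x => d.modify x 0 (· + 1)) z with hfdef
    have hfd : ∀ k, final.getD k 0 = (xs.count k : Int) := by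
      intro k
      rw [hfdef, PySem.Dict.getD_foldl_modify_add_one, hz0]
      simp
    have hfk : ∀ k, k ∈ final.keys ↔ k ∈ r.keys := by
      intro k
      rw [hfdef, PySem.Dict.keys_foldl_modify, hzk, PySem.Set.mem_update]
      constructor
      · rintro (h | h)
        · exact h
        · exact hgood' k h
      · exact Or.inl
    have hfc : ∀ k, final.contains k = r.contains k := by
      intro k
      rw [PySem.Dict.contains_eq_decide_mem_keys, PySem.Dict.contains_eq_decide_mem_keys]
      simp [hfk k]
    have hfget : ∀ k, k ∈ r.keys → final.get? k = some ((xs.count k : Int)) := by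
      intro k hk
      rw [get?_eq_ite, hfc k, PySem.Dict.contains_eq_decide_mem_keys, if_pos (by simpa using hk), hfd]
    have h1 : pyDictEq final r = true ↔ (∀ k ∈ r.keys, xs.count k = L.count k) := by
      simp only [pyDictEq, Bool.and_eq_true, List.all_eq_true, beq_iff_eq]
      constructor
      · rintro ⟨_, c2⟩ k hk
        have := c2 k hk
        rw [hfget k hk, hcount k hk] at this
        exact_mod_cast (Option.some.inj this).symm
      · intro hP
        have heach : ∀ k ∈ r.keys, r.get? k = final.get? k := by
          intro k hk
          rw [hfget k hk, hcount k hk, hP k hk]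
        exact ⟨fun k hk => heach k ((hfk k).mp hk), heach⟩
    have h2 : xs.Perm L ↔ (∀ k ∈ r.keys, xs.count k = L.count k) := by
      rw [List.perm_iff_count]
      constructor
      · intro hp k _; exact hp k
      · intro hP s
        by_cases hs : s ∈ r.keys
        · exact hP s hs
        · rw [List.count_eq_zero_of_not_mem (fun h => hs (hgood' s h)),
            List.count_eq_zero_of_not_mem (fun h => hs (hLmem s h))]
    refine bool_eq_of_iff (h1.trans ?_)
    rw [← h2]; simp
  · rw [if_neg hgood]
    obtain ⟨f, hf, hbad⟩ : ∃ f ∈ files, ¬ r.contains (extOf f) = true := by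
      by_contra hcon
      push Not at hcon
      exact hgood (List.all_eq_true.mpr hcon)
    have hnk : extOf f ∉ r.keys := by
      rw [PySem.Dict.contains_eq_decide_mem_keys] at hbad
      simpa using hbad
    have hnp : ¬ xs.Perm L := by
      intro hp
      have hmem : extOf f ∈ xs := by rw [hxs]; exact List.mem_map_of_mem hf
      exact hnk (hLmem _ (hp.mem_iff.mp hmem))
    simp [hnp]

-- B decides the same permutation: sorted(xs) == L for an already-sorted L
lemma bside (xs L : List String)
    (hL : PySem.List.sorted L (fun x => x) false = L) :
    (PySem.List.sorted xs (fun x => x) false == L) = decide (xs.Perm L) := by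
  refine bool_eq_of_iff ?_
  rw [beq_iff_eq, ← hL, PySem.List.sorted_id_eq_sorted_id_iff_perm, hL]
  simp

-- String ≤ via toList (kernel-checkable on literals)
lemma strle (a b : String) (h : a.toList ≤ b.toList) : a ≤ b := String.le_iff_toList_le.mpr h

-- the two required multisets are already sorted
lemma sortedL4 : PySem.List.sorted [(".json" : String), ".json", ".jsonld", ".xml"] (fun x => x) false = [".json", ".json", ".jsonld", ".xml"] := by
  apply PySem.List.sorted_eq_self_of_pairwise
  refine List.Pairwise.cons ?_ (List.Pairwise.cons ?_ (List.Pairwise.cons ?_ (List.pairwise_singleton _ _)))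
  · intro b hb; fin_cases hb
    · exact strle _ _ (by decide)
    · exact strle _ _ (by decide)
    · exact strle _ _ (by decide)
  · intro b hb; fin_cases hb
    · exact strle _ _ (by decide)
    · exact strle _ _ (by decide)
  · intro b hb; fin_cases hb
    · exact strle _ _ (by decide)

lemma sortedL2 : PySem.List.sorted [(".json" : String), ".xml"] (fun x => x) false = [".json", ".xml"] := by
  apply PySem.List.sorted_eq_self_of_pairwise
  refine List.Pairwise.cons ?_ (List.pairwise_singleton _ _)
  intro b hb; fin_cases hb
  exact strle _ _ (by decide)

-- ===== VERDICT (by name: the statement is the Claim_ definition above) =====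
theorem validate_file_list_spec : Claim_equal_validate_file_list := by
  intro file_list create_rdf _
  show validate_file_list file_list create_rdf = validate_file_list_alt file_list create_rdf
  unfold validate_file_list validate_file_list_alt
  cases create_rdf
  · simp only [Bool.false_eq_true, if_false]
    rw [core _ [".json", ".xml"] (by decide) (by decide) (by decide),
      bside _ _ sortedL2]
  · simp only [if_true]
    rw [core _ [".json", ".json", ".jsonld", ".xml"] (by decide) (by decide) (by decide),
      bside _ _ sortedL4]
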